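-- pv_equiv track=rewrite | github.com/CrowdingFaun624/JavaDataMiner | DataMiners/SoundEvents/SoundEvents4.py | filter_illegal_characters
-- ===== SOURCE A (Python) =====
-- def filter_illegal_characters(string_list:list[str]) -> list[str]:
--     ILLEGAL_CHARACTERS = set(" !@#$%^&*()-+=[]{}\\|;:\"\',<>/?`~")
--     output:list[str] = []
--     for item in string_list:
--         if item == "": continue
--         string_is_bad = False
--         for illegal_character in ILLEGAL_CHARACTERS:
--             if illegal_character in item: string_is_bad = True; break
--         if string_is_bad: continue
--         else: output.append(item)
--     return output
-- ===== SOURCE B (Python) =====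
-- def filter_illegal_characters(string_list:list[str]) -> list[str]:
--     ILLEGAL_CHARACTERS = set(" !@#$%^&*()-+=[]{}\\|;:\"\',<>/?`~")
--     return [item for item in string_list
--             if item != "" and all(c not in ILLEGAL_CHARACTERS for c in item)]
-- ===== Notes on version B (the rewrite author's own statement) =====
-- stated objective: simpler
-- what changed: Replaces the accumulator loop with a break-out inner scan over the illegal set (membership test per illegal character) by a single filtering comprehension that examines each character of the string once against the set.
import Mathlib
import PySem

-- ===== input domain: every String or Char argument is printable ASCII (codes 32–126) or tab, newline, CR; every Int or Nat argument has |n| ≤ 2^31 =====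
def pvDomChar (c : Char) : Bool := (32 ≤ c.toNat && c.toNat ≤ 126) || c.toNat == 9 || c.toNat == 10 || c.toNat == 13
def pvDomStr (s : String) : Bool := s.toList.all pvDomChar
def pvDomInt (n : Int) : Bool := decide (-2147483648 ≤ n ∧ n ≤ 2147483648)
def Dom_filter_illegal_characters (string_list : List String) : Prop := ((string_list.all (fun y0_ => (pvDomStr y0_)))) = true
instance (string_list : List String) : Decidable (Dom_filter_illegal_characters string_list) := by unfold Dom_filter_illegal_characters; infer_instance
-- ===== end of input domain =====

-- B replaces A's per-illegal-character substring scan (with a break flag) by a single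
-- filtering comprehension that checks each character of the string against the set once:
-- same result, simpler traversal.

-- ===== PORT A =====
-- ILLEGAL_CHARACTERS = set(" !@#$%^&*()-+=[]{}\\|;:\"\',<>/?`~")  (a Python set of 1-char strings)
def pvIllegalA : PySem.Set Char :=
  PySem.Set.ofList " !@#$%^&*()-+=[]{}\\|;:\"',<>/?`~".toList

-- inner 'for illegal_character in ILLEGAL_CHARACTERS: if illegal_character in item: … break'
def pvBadLoop (illegal : List Char) (item : String) : Bool :=
  match illegal with
  | [] => false
  | c :: rest => if PySem.Chars.isIn [c] item.toList then true else pvBadLoop rest item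

def filter_illegal_characters (string_list : List String) : List String :=
  string_list.foldl (fun output item =>
    if item == "" then output
    else
      let string_is_bad := pvBadLoop pvIllegalA item
      if string_is_bad then output else output ++ [item]) []

-- ===== PORT B =====
def pvIllegalB : PySem.Set Char :=
  PySem.Set.ofList " !@#$%^&*()-+=[]{}\\|;:\"',<>/?`~".toList

def filter_illegal_characters_alt (string_list : List String) : List String :=
  string_list.filter (fun item =>
    item != "" && item.toList.all (fun c => !(PySem.Set.contains pvIllegalB c)))

-- ===== PRECONDITION & SPEC =====
def Spec_filter_illegal_characters (string_list : List String) (out : List String) : Prop := out = filter_illegal_characters_alt string_list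
instance (string_list : List String) (out : List String) : Decidable (Spec_filter_illegal_characters string_list out) := by unfold Spec_filter_illegal_characters; infer_instance

-- ===== CLAIM (what is proved, stated in full; the proofs are below) =====
def Claim_equal_filter_illegal_characters : Prop := ∀ (string_list : List String), Dom_filter_illegal_characters string_list → Spec_filter_illegal_characters string_list (filter_illegal_characters string_list)

-- ===== LEMMAS AND PROOFS =====

-- 'c in item' for a single character is membership in the string's characters
theorem pv_isIn_singleton (c : Char) (s : List Char) :
    PySem.Chars.isIn [c] s = s.contains c := by
  rcases h : s.contains c with _ | _
  · rw [PySem.Chars.isIn_eq_false_iff]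
    intro hinf
    have : c ∈ s := hinf.subset (by simp)
    simp [List.contains_eq_mem] at h
    exact h this
  · rw [PySem.Chars.isIn_iff_infix]
    simp only [List.contains_eq_mem, decide_eq_true_eq] at h
    obtain ⟨t1, t2, ht⟩ := List.append_of_mem h
    exact ⟨t1, t2, by simp [ht]⟩

-- A's inner break loop computes 'some illegal character occurs in item'
theorem pvBadLoop_eq_any (illegal : List Char) (item : String) :
    pvBadLoop illegal item = illegal.any (fun c => item.toList.contains c) := by
  induction illegal with
  | nil => rfl
  | cons c rest ih =>
    simp only [pvBadLoop, pv_isIn_singleton, List.any_cons]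
    rcases item.toList.contains c with _ | _ <;> simp [ih]

-- swapping the quantifier: no character of item is illegal ↔ no illegal char occurs in item
theorem pv_all_eq_not_any (illegal : List Char) (item : String) :
    (item.toList.all fun c => !illegal.contains c) = !illegal.any (fun c => item.toList.contains c) := by
  apply Bool.eq_iff_iff.mpr
  simp [List.contains_eq_mem]
  tauto

theorem pv_body_eq (item : String) :
    (item != "" && item.toList.all (fun c => !(PySem.Set.contains pvIllegalB c)))
      = (!(item == "") && !pvBadLoop pvIllegalA item) := by
  have hset : pvIllegalB = pvIllegalA := rfl
  rw [hset, pvBadLoop_eq_any, ← pv_all_eq_not_any]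
  simp [PySem.Set.contains_eq_listContains, bne]

theorem pv_foldl_eq (string_list : List String) (acc : List String) :
    string_list.foldl (fun output item =>
      if item == "" then output
      else
        let string_is_bad := pvBadLoop pvIllegalA item
        if string_is_bad then output else output ++ [item]) acc
    = acc ++ string_list.filter (fun item =>
        item != "" && item.toList.all (fun c => !(PySem.Set.contains pvIllegalB c))) := by
  have hfun : (fun (output : List String) item =>
      if item == "" then output
      else
        let string_is_bad := pvBadLoop pvIllegalA item
        if string_is_bad then output else output ++ [item])
    = (fun output item =>
        if (item != "" && item.toList.all (fun c => !(PySem.Set.contains pvIllegalB c)))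
        then output ++ [(fun x => x) item] else output) := by
    funext o i
    rw [pv_body_eq i]
    rcases (i == "") with _ | _ <;> rcases pvBadLoop pvIllegalA i with _ | _ <;> simp
  rw [hfun, PySem.List.foldl_append_if]
  simp

-- ===== VERDICT (by name: the statement is the Claim_ definition above) =====
theorem filter_illegal_characters_spec : Claim_equal_filter_illegal_characters := by
  intro string_list _
  unfold Spec_filter_illegal_characters filter_illegal_characters filter_illegal_characters_alt
  simpa using pv_foldl_eq string_list []
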